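-- pv_equiv track=rewrite | github.com/daniel-reich/ubiquitous-fiesta | Rep3fHbrLGKDatZ2L_5.py | complete_pattern
-- ===== SOURCE A (Python) =====
-- def complete_pattern(s):
--     repeats = []
--     for i in set(s):
--         new = s[:].replace('_', i)
--         for j in range(1, len(s) + 1):
--             if (new[:j]*(len(s)//j + 1))[:len(s)] == new:
--                 repeats.append((j, i))
--     return min(repeats)[1]
-- ===== SOURCE B (Python) =====
-- def complete_pattern(s):
--     chars = sorted(set(s))
--     for j in range(1, len(s) + 1):
--         forced = None
--         ok = True
--         for a, b in zip(s, s[j:]):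
--             if a == b:
--                 continue
--             if a == '_':
--                 need = b
--             elif b == '_':
--                 need = a
--             else:
--                 ok = False
--                 break
--             if forced is None:
--                 forced = need
--             elif forced != need:
--                 ok = False
--                 break
--         if ok:
--             return forced if forced is not None else chars[0]
-- ===== Notes on version B (the rewrite author's own statement) =====
-- stated objective: alternative
-- what changed: B never builds the replaced string or any tiled copy: it scans candidate periods j in increasing order, compares s directly with its j-shift to derive which fill character (if any) the period forces, and returns at the first feasible period either the forced character or the smallest character of set(s).
import Mathlib
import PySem

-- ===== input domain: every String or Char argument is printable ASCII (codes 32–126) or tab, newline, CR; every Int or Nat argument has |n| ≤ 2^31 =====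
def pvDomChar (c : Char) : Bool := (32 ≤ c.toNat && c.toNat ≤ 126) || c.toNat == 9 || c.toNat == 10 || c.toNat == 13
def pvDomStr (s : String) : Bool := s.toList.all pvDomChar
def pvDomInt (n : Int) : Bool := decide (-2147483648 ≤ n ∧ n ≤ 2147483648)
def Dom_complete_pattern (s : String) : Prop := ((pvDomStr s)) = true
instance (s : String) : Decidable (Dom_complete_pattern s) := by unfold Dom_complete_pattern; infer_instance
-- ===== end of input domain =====

-- B replaces A's per-character tiling search by a scan over candidate periods j in increasing
-- order: comparing s with its j-shift directly determines which fill character (if any) the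
-- period forces, so no replaced string or tiled copy is ever built; B returns at the first
-- feasible period.  Return-value equivalence only (neither version mutates its input).

-- ===== PORT A =====
-- repeats.append inside two nested loops; (new[:j]*(len(s)//j+1))[:len(s)] == new; min(repeats)[1]
def complete_pattern (s : String) : String :=
  let n : Int := (s.toList.length : Int)
  let repeats : List (Int × Char) :=
    (PySem.Set.ofList s.toList).foldl (fun acc i =>
      let new := PySem.Chars.replace s.toList ['_'] [i]
      (PySem.List.pyRange 1 (n + 1) 1).foldl (fun acc2 j =>
        if PySem.List.slice
             (PySem.List.pyRepeat (PySem.List.slice new none (some j)) (PySem.Int.floordiv n j + 1))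
             none (some n) = new
        then acc2 ++ [(j, i)] else acc2) acc) []
  match PySem.List.min2? repeats (fun p => p.1) (fun p => p.2) with
  | some p => String.mk [p.2]
  | none => ""   -- Python: min([]) raises ValueError; excluded by Pre_

-- ===== PORT B =====
-- inner loop 'for a, b in zip(s, s[j:])' with break: the forced fill char, or failure (none)
def pvInner : List (Char × Char) → Option Char → Option (Option Char)
  | [], forced => some forced
  | (a, b) :: rest, forced =>
    if a = b then pvInner rest forced
    else
      match (if a = '_' then some b else if b = '_' then some a else none) with
      | none => none
      | some need =>
        match forced with
        | none => pvInner rest (some need)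
        | some f => if f = need then pvInner rest forced else none

-- for j in range(1, len(s)+1): first feasible j returns forced-or-chars[0]
def complete_pattern_alt (s : String) : String :=
  let L := s.toList
  let chars := PySem.List.sorted (PySem.Set.ofList L) (fun x => x) false
  match (PySem.List.pyRange 1 ((L.length : Int) + 1) 1).findSome? (fun j =>
      match pvInner (L.zip (PySem.List.slice L (some j) none)) none with
      | some forced => some (forced.getD ((PySem.List.pyGet? chars 0).getD '_'))
      | none => none) with
  | some c => String.mk [c]
  | none => ""   -- Python: loop exhausted only for s = "", returns None; excluded by Pre_

-- ===== PRECONDITION & SPEC =====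
-- Pre_ excludes only the empty string, on which A raises ValueError (min of an empty sequence).
def Pre_complete_pattern (s : String) : Prop := s ≠ ""
instance (s : String) : Decidable (Pre_complete_pattern s) := by unfold Pre_complete_pattern; infer_instance
def pvWitness_complete_pattern : String := "ab_ab"

def Spec_complete_pattern (s : String) (out : String) : Prop := out = complete_pattern_alt s
instance (s : String) (out : String) : Decidable (Spec_complete_pattern s out) := by unfold Spec_complete_pattern; infer_instance

-- ===== CLAIM (what is proved, stated in full; the proofs are below) =====
def Claim_equal_complete_pattern : Prop := ∀ (s : String), Dom_complete_pattern s → Pre_complete_pattern s → Spec_complete_pattern s (complete_pattern s)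

-- ===== LEMMAS AND PROOFS =====

-- characterise single-char replace as a map
theorem replace_go_single (c : Char) :
    ∀ (l : List Char) (fuel : Nat) (acc : List Char), l.length ≤ fuel →
      PySem.Chars.replace.go ['_'] [c] fuel l acc
        = acc.reverse ++ l.map (fun x => if x = '_' then c else x) := by
  intro l
  induction l with
  | nil => intro fuel acc h; cases fuel <;> simp [PySem.Chars.replace.go]
  | cons x t ih =>
    intro fuel acc h
    cases fuel with
    | zero => simp at h
    | succ f =>
      rw [PySem.Chars.replace.go]
      by_cases hx : x = '_'
      · subst hx
        simp [List.isPrefixOf, ih f (c :: acc) (by simpa using h)]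
      · rw [if_neg (by simp [Ne.symm hx]), ih f (x :: acc) (by simpa using h)]
        simp [hx]

theorem replace_single (l : List Char) (c : Char) :
    PySem.Chars.replace l ['_'] [c] = l.map (fun x => if x = '_' then c else x) := by
  rw [PySem.Chars.replace]
  simp [replace_go_single c l l.length [] le_rfl]

theorem len_replace_single (L : List Char) (c : Char) :
    (PySem.Chars.replace L ['_'] [c]).length = L.length := by
  rw [replace_single, List.length_map]

-- j is a period of t (tiling a prefix of length j reproduces t) iff the j-shift overlaps
theorem drop_eq_take_iff (t : List Char) (j : Nat) :
    t.drop j = t.take (t.length - j) ↔ ∀ u, j + u < t.length → t[j+u]? = t[u]? := by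
  constructor
  · intro h u hu
    have h1 : (t.drop j)[u]? = t[j+u]? := by rw [List.getElem?_drop]
    have h2 : (t.take (t.length - j))[u]? = t[u]? := List.getElem?_take_of_lt (by omega)
    rw [← h1, ← h2, h]
  · intro h
    apply List.ext_getElem?
    intro u
    rw [List.getElem?_drop]
    by_cases hu : u < t.length - j
    · rw [List.getElem?_take_of_lt hu, h u (by omega)]
    · rw [List.getElem?_eq_none (l := t.take (t.length - j)) (by simp; omega)]
      exact List.getElem?_eq_none (by omega)

theorem getElem?_flatten_replicate (p : List Char) :
    ∀ (k u : Nat), u < k * p.length →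
      (List.replicate k p).flatten[u]? = p[u % p.length]? := by
  intro k
  induction k with
  | zero => intro u h; omega
  | succ k ih =>
    intro u h
    have hsm : (k+1) * p.length = k * p.length + p.length := Nat.succ_mul k p.length
    rw [List.replicate_succ, List.flatten_cons]
    by_cases hu : u < p.length
    · rw [List.getElem?_append_left hu, Nat.mod_eq_of_lt hu]
    · rw [List.getElem?_append_right (by omega)]
      have hmod : (u - p.length) % p.length = u % p.length := by
        conv_rhs => rw [← Nat.sub_add_cancel (by omega : p.length ≤ u)]
        rw [Nat.add_mod_right]
      rw [ih (u - p.length) (by omega), hmod]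

theorem tile_iff_overlap (t : List Char) (j : Nat) (hj1 : 1 ≤ j) (hj2 : j ≤ t.length) :
    (List.replicate (t.length / j + 1) (t.take j)).flatten.take t.length = t ↔
      t.drop j = t.take (t.length - j) := by
  set n := t.length with hn
  set k := n / j + 1 with hk
  set p := t.take j with hpdef
  have hp : p.length = j := by simp [hpdef]; omega
  have hkj : n < k * j := by
    have h1 := Nat.div_add_mod n j
    have h2 := Nat.mod_lt n (show 0 < j by omega)
    have h3 : k * j = n / j * j + j := Nat.succ_mul (n / j) j
    have h4 : j * (n / j) = n / j * j := Nat.mul_comm _ _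
    omega
  have hpget : ∀ u, u < j → p[u]? = t[u]? := by
    intro u hu
    rw [hpdef, List.getElem?_take_of_lt hu]
  rw [drop_eq_take_iff t j]
  constructor
  · intro hA u hu
    have hget : ∀ x, x < n → t[x]? = p[x % j]? := by
      intro x hx
      rw [← hA, List.getElem?_take_of_lt hx,
        getElem?_flatten_replicate p k x (by rw [hp]; omega), hp]
    rw [hget (j+u) (by omega), hget u (by omega), Nat.add_mod_left]
  · intro hB
    have hper : ∀ x, x < n → t[x]? = p[x % j]? := by
      intro x
      induction x using Nat.strong_induction_on with
      | _ x ih =>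
        intro hx
        by_cases hxj : x < j
        · rw [Nat.mod_eq_of_lt hxj, hpget x hxj]
        · have hx' : x = j + (x - j) := by omega
          rw [hx', hB (x - j) (by omega), ih (x - j) (by omega) (by omega),
            Nat.add_mod_left]
    apply List.ext_getElem?
    intro u
    by_cases hu : u < n
    · rw [List.getElem?_take_of_lt hu,
        getElem?_flatten_replicate p k u (by rw [hp]; omega), hp]
      exact (hper u hu).symm
    · rw [List.getElem?_eq_none (by simp; omega)]
      exact (List.getElem?_eq_none (by omega)).symm

-- A's tiling test, at the port's Int/slice level, is the overlap test
theorem condA_iff_condB (L : List Char) (c : Char) (j : Int)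
    (hj : 1 ≤ j) (hjn : j ≤ (L.length : Int)) :
    (PySem.List.slice
        (PySem.List.pyRepeat (PySem.List.slice (PySem.Chars.replace L ['_'] [c]) none (some j))
          (PySem.Int.floordiv (L.length : Int) j + 1))
        none (some (L.length : Int)) = PySem.Chars.replace L ['_'] [c]) ↔
      (PySem.List.slice (PySem.Chars.replace L ['_'] [c]) (some j) none =
        PySem.List.slice (PySem.Chars.replace L ['_'] [c]) none
          (some (((PySem.Chars.replace L ['_'] [c]).length : Int) - j))) := by
  set t := PySem.Chars.replace L ['_'] [c] with ht
  have htlen : t.length = L.length := len_replace_single L c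
  have hj0 : (0:Int) ≤ j := by omega
  obtain ⟨jn, rfl⟩ : ∃ jn : Nat, j = (jn : Int) := ⟨j.toNat, (Int.toNat_of_nonneg hj0).symm⟩
  have hjn1 : 1 ≤ jn := by exact_mod_cast hj
  have hjn2 : jn ≤ L.length := by exact_mod_cast hjn
  simp only [PySem.List.slice_to_natCast, PySem.List.slice_from_natCast]
  rw [PySem.Int.floordiv_natCast]
  have hrep : PySem.List.pyRepeat (t.take jn) (((L.length / jn : Nat) : Int) + 1)
      = (List.replicate (L.length / jn + 1) (t.take jn)).flatten := by
    show (List.replicate ((((L.length / jn : Nat) : Int) + 1).toNat) (t.take jn)).flatten = _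
    congr 1
  rw [hrep]
  have hsub : ((t.length : Int) - (jn : Int)) = ((t.length - jn : Nat) : Int) := by
    rw [htlen]; omega
  rw [hsub]
  simp only [PySem.List.slice_to_natCast]
  rw [show t.length = L.length from htlen]
  have := tile_iff_overlap t jn hjn1 (by omega)
  rw [htlen] at this
  exact this

-- lexicographic order on (period, char) pairs, = Python's tuple comparison
def lexLe (p q : Int × Char) : Prop := p.1 < q.1 ∨ (p.1 = q.1 ∧ p.2 ≤ q.2)

theorem lexLe_refl (p : Int × Char) : lexLe p p := Or.inr ⟨rfl, le_refl _⟩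

theorem lexLe_trans {p q r : Int × Char} (h1 : lexLe p q) (h2 : lexLe q r) : lexLe p r := by
  rcases h1 with h1 | ⟨e1, l1⟩ <;> rcases h2 with h2 | ⟨e2, l2⟩
  · exact Or.inl (h1.trans h2)
  · exact Or.inl (e2 ▸ h1)
  · exact Or.inl (e1 ▸ h2)
  · exact Or.inr ⟨e1.trans e2, l1.trans l2⟩

theorem lexLe_antisymm {p q : Int × Char} (h1 : lexLe p q) (h2 : lexLe q p) : p = q := by
  rcases h1 with h1 | ⟨e1, l1⟩ <;> rcases h2 with h2 | ⟨e2, l2⟩ <;>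
    [omega; (exact absurd h1 (by omega)); (exact absurd h2 (by omega)); skip]
  exact Prod.ext e1 (le_antisymm l1 l2)

theorem min2?_fold_inv :
    ∀ (l : List (Int × Char)) (b : Int × Char),
      ∃ r, l.foldl (fun acc x =>
          match acc with
          | none => some x
          | some m => if (decide (x.1 < m.1) || !decide (m.1 < x.1) && decide (x.2 < m.2)) = true
                      then some x else some m) (some b) = some r ∧
        (r = b ∨ r ∈ l) ∧ lexLe r b ∧ ∀ q ∈ l, lexLe r q := by
  intro l
  induction l with
  | nil => intro b; exact ⟨b, rfl, Or.inl rfl, lexLe_refl b, by simp⟩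
  | cons x tl ih =>
    intro b
    rw [List.foldl_cons]
    by_cases hc : (decide (x.1 < b.1) || !decide (b.1 < x.1) && decide (x.2 < b.2)) = true
    · have hstep : (match some b with
          | none => some x
          | some m => if (decide (x.1 < m.1) || !decide (m.1 < x.1) && decide (x.2 < m.2)) = true
                      then some x else some m) = some x := if_pos hc
      rw [hstep]
      obtain ⟨r, hr, hmem, hle, hall⟩ := ih x
      have hxb : lexLe x b := by
        rcases Bool.or_eq_true_iff.mp hc with h | h
        · exact Or.inl (by simpa using h)
        · simp only [Bool.and_eq_true, Bool.not_eq_eq_eq_not, Bool.not_true,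
            decide_eq_false_iff_not, decide_eq_true_eq] at h
          rcases lt_or_eq_of_le (not_lt.mp h.1) with h' | h'
          · exact Or.inl h'
          · exact Or.inr ⟨h', le_of_lt h.2⟩
      refine ⟨r, hr, ?_, lexLe_trans hle hxb, ?_⟩
      · rcases hmem with h | h
        · exact Or.inr (h ▸ List.mem_cons_self)
        · exact Or.inr (List.mem_cons_of_mem _ h)
      · intro q hq
        rcases List.mem_cons.mp hq with h | h
        · exact h ▸ hle
        · exact hall q h
    · have hstep : (match some b with
          | none => some x
          | some m => if (decide (x.1 < m.1) || !decide (m.1 < x.1) && decide (x.2 < m.2)) = true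
                      then some x else some m) = some b := if_neg hc
      rw [hstep]
      obtain ⟨r, hr, hmem, hle, hall⟩ := ih b
      have hbx : lexLe b x := by
        simp only [Bool.or_eq_true_iff, Bool.and_eq_true, Bool.not_eq_eq_eq_not, Bool.not_true,
          decide_eq_false_iff_not, decide_eq_true_eq, not_or, not_and_or] at hc
        rcases hc with ⟨h1, h2⟩
        rcases h2 with h2 | h2
        · exact Or.inl (not_not.mp h2)
        · rcases lt_or_eq_of_le (not_lt.mp h1) with h' | h'
          · exact Or.inl h'
          · exact Or.inr ⟨h', by simpa using h2⟩
      refine ⟨r, hr, ?_, hle, ?_⟩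
      · rcases hmem with h | h
        · exact Or.inl h
        · exact Or.inr (List.mem_cons_of_mem _ h)
      · intro q hq
        rcases List.mem_cons.mp hq with h | h
        · exact h ▸ lexLe_trans hle hbx
        · exact hall q h

theorem min2?_eq_foldl (R : List (Int × Char)) :
    PySem.List.min2? R (fun p => p.1) (fun p => p.2) = R.foldl (fun acc x =>
          match acc with
          | none => some x
          | some m => if (decide (x.1 < m.1) || !decide (m.1 < x.1) && decide (x.2 < m.2)) = true
                      then some x else some m) none := by
  unfold PySem.List.min2?
  congr 1
  funext acc x
  cases acc <;> rfl

theorem min2?_int_char (R : List (Int × Char)) (hne : R ≠ []) :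
    ∃ r, PySem.List.min2? R (fun p => p.1) (fun p => p.2) = some r ∧ r ∈ R ∧ ∀ q ∈ R, lexLe r q := by
  cases R with
  | nil => exact absurd rfl hne
  | cons h tl =>
    obtain ⟨r, hr, hmem, hle, hall⟩ := min2?_fold_inv tl h
    refine ⟨r, ?_, ?_, ?_⟩
    · rw [min2?_eq_foldl, List.foldl_cons]
      exact hr
    · rcases hmem with h' | h'
      · exact h' ▸ List.mem_cons_self
      · exact List.mem_cons_of_mem _ h'
    · intro q hq
      rcases List.mem_cons.mp hq with h' | h'
      · exact h' ▸ hle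
      · exact hall q h'

-- B's per-character overlap predicate and the list of valid periods (proof-side only)
def qBfun (t : List Char) : Int → Bool := fun j =>
  decide (PySem.List.slice t (some j) none = PySem.List.slice t none (some ((t.length : Int) - j)))

def Fof (t : List Char) : List Int :=
  (PySem.List.pyRange 1 ((t.length : Int) + 1) 1).filter (qBfun t)

theorem qB_full (t : List Char) : qBfun t ((t.length : Int)) = true := by
  simp only [qBfun, PySem.List.slice_from_natCast, decide_eq_true_eq]
  rw [show (t.length : Int) - (t.length : Int) = ((0 : Nat) : Int) by omega,
    PySem.List.slice_to_natCast]
  simp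

def tOf (L : List Char) (c : Char) : List Char := PySem.Chars.replace L ['_'] [c]

def pairsOf (L : List Char) (c : Char) : List (Int × Char) :=
  (Fof (tOf L c)).map (fun j => (j, c))

-- A's accumulated repeats list, in flatMap form with the overlap predicate
theorem filterA_eq_Fof (L : List Char) (c : Char) :
    (PySem.List.pyRange 1 ((L.length : Int) + 1) 1).filter
        (fun j => decide (PySem.List.slice
          (PySem.List.pyRepeat (PySem.List.slice (PySem.Chars.replace L ['_'] [c]) none (some j))
            (PySem.Int.floordiv (L.length : Int) j + 1))
          none (some (L.length : Int)) = PySem.Chars.replace L ['_'] [c]))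
      = Fof (tOf L c) := by
  unfold Fof
  rw [show (((tOf L c).length : Int)) = ((L.length : Int)) by
    rw [show (tOf L c).length = L.length from len_replace_single L c]]
  apply List.filter_congr
  intro j hj
  have hb := (PySem.List.mem_pyRange_one).mp hj
  exact decide_eq_decide.mpr (condA_iff_condB L c j hb.1 (by omega))

theorem portA_repeats (L : List Char) :
    (PySem.Set.ofList L).foldl (fun acc i =>
      (PySem.List.pyRange 1 ((L.length : Int) + 1) 1).foldl (fun acc2 j =>
        if PySem.List.slice
             (PySem.List.pyRepeat (PySem.List.slice (PySem.Chars.replace L ['_'] [i]) none (some j))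
               (PySem.Int.floordiv (L.length : Int) j + 1))
             none (some (L.length : Int)) = PySem.Chars.replace L ['_'] [i]
        then acc2 ++ [(j, i)] else acc2) acc) []
      = (PySem.Set.ofList L).flatMap (pairsOf L) := by
  have hstep : (fun (acc : List (Int × Char)) i =>
      (PySem.List.pyRange 1 ((L.length : Int) + 1) 1).foldl (fun acc2 j =>
        if PySem.List.slice
             (PySem.List.pyRepeat (PySem.List.slice (PySem.Chars.replace L ['_'] [i]) none (some j))
               (PySem.Int.floordiv (L.length : Int) j + 1))
             none (some (L.length : Int)) = PySem.Chars.replace L ['_'] [i]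
        then acc2 ++ [(j, i)] else acc2) acc)
      = fun acc i => acc ++ pairsOf L i := by
    funext acc i
    rw [show (fun (acc2 : List (Int × Char)) (j : Int) =>
        if PySem.List.slice
             (PySem.List.pyRepeat (PySem.List.slice (PySem.Chars.replace L ['_'] [i]) none (some j))
               (PySem.Int.floordiv (L.length : Int) j + 1))
             none (some (L.length : Int)) = PySem.Chars.replace L ['_'] [i]
        then acc2 ++ [(j, i)] else acc2)
      = fun (acc2 : List (Int × Char)) (j : Int) =>
        if (fun j => decide (PySem.List.slice
             (PySem.List.pyRepeat (PySem.List.slice (PySem.Chars.replace L ['_'] [i]) none (some j))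
               (PySem.Int.floordiv (L.length : Int) j + 1))
             none (some (L.length : Int)) = PySem.Chars.replace L ['_'] [i])) j = true
        then acc2 ++ [(j, i)] else acc2 from by
      funext acc2 j
      simp only [decide_eq_true_eq]]
    rw [PySem.List.foldl_append_if]
    rw [filterA_eq_Fof L i]
    rfl
  rw [hstep, PySem.List.foldl_append_eq_flatMap, List.nil_append]

theorem mem_flatMap_pairs (L : List Char) (p : Int × Char) :
    p ∈ (PySem.Set.ofList L).flatMap (pairsOf L) ↔
      p.2 ∈ PySem.Set.ofList L ∧ p.1 ∈ Fof (tOf L p.2) := by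
  rw [List.mem_flatMap]
  constructor
  · rintro ⟨c, hc, hp⟩
    obtain ⟨j, hj, he⟩ := List.mem_map.mp hp
    cases he
    exact ⟨hc, hj⟩
  · rintro ⟨hc, hj⟩
    exact ⟨p.2, hc, List.mem_map.mpr ⟨p.1, hj, rfl⟩⟩

-- ===== B-side characterisation =====

def pvRep (c x : Char) : Char := if x = '_' then c else x

def ValidP (c : Char) (P : List (Char × Char)) : Prop := ∀ p ∈ P, pvRep c p.1 = pvRep c p.2

def OkF (c : Char) : Option Char → Prop
  | none => True
  | some d => c = d

-- the inner scan computes exactly the set of fill characters making every pair agree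
theorem valid_cons (c : Char) (a b : Char) (rest : List (Char × Char)) :
    ValidP c ((a, b) :: rest) ↔ (pvRep c a = pvRep c b ∧ ValidP c rest) := by
  unfold ValidP; simp

theorem inner_spec : ∀ (P : List (Char × Char)) (forced : Option Char) (c : Char),
    (pvInner P forced = none → ¬ (OkF c forced ∧ ValidP c P)) ∧
    (∀ f, pvInner P forced = some f → (OkF c f ↔ (OkF c forced ∧ ValidP c P))) := by
  intro P
  induction P with
  | nil =>
    intro forced c
    refine ⟨fun h => by simp [pvInner] at h, fun f hf => ?_⟩
    simp only [pvInner, Option.some.injEq] at hf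
    subst hf
    simp [ValidP]
  | cons p rest ih =>
    rintro forced c
    obtain ⟨a, b⟩ := p
    rw [valid_cons]
    by_cases hab : a = b
    · -- pair trivially agrees
      subst hab
      have he : pvInner ((a, a) :: rest) forced = pvInner rest forced := by
        simp [pvInner]
      rw [he]
      refine ⟨fun h hc => (ih forced c).1 h ⟨hc.1, hc.2.2⟩, fun f hf => ?_⟩
      rw [(ih forced c).2 f hf]
      simp
    · by_cases ha : a = '_'
      · -- need = b, b ≠ '_'
        subst ha
        have hb : b ≠ '_' := fun h => hab h.symm
        have hpair : (pvRep c '_' = pvRep c b) ↔ c = b := by simp [pvRep, hb]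
        cases forced with
        | none =>
          have he : pvInner (('_', b) :: rest) none = pvInner rest (some b) := by
            simp [pvInner, hab]
          rw [he]
          refine ⟨fun h hc => (ih (some b) c).1 h ⟨hpair.mp hc.2.1, hc.2.2⟩, fun f hf => ?_⟩
          rw [(ih (some b) c).2 f hf]
          show (c = b ∧ _) ↔ _
          rw [hpair]
          tauto
        | some f0 =>
          by_cases hfb : f0 = b
          · subst hfb
            have he : pvInner (('_', f0) :: rest) (some f0) = pvInner rest (some f0) := by
              simp [pvInner, hab]
            rw [he]
            refine ⟨fun h hc => (ih (some f0) c).1 h ⟨hc.1, hc.2.2⟩, fun f hf => ?_⟩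
            rw [(ih (some f0) c).2 f hf]
            show _ ↔ (c = f0 ∧ _)
            rw [hpair]
            tauto
          · have he : pvInner (('_', b) :: rest) (some f0) = none := by
              simp [pvInner, hab, hfb]
            rw [he]
            refine ⟨fun _ hc => ?_, fun f hf => by simp at hf⟩
            exact hfb ((hc.1.symm.trans (hpair.mp hc.2.1)))
      · by_cases hbu : b = '_'
        · -- need = a, a ≠ '_'
          subst hbu
          have hpair : (pvRep c a = pvRep c '_') ↔ c = a := by
            simp [pvRep, ha]; exact eq_comm
          cases forced with
          | none =>
            have he : pvInner ((a, '_') :: rest) none = pvInner rest (some a) := by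
              simp [pvInner, hab]
            rw [he]
            refine ⟨fun h hc => (ih (some a) c).1 h ⟨hpair.mp hc.2.1, hc.2.2⟩, fun f hf => ?_⟩
            rw [(ih (some a) c).2 f hf]
            show (c = a ∧ _) ↔ _
            rw [hpair]
            tauto
          | some f0 =>
            by_cases hfa : f0 = a
            · subst hfa
              have he : pvInner ((f0, '_') :: rest) (some f0) = pvInner rest (some f0) := by
                simp [pvInner, hab]
              rw [he]
              refine ⟨fun h hc => (ih (some f0) c).1 h ⟨hc.1, hc.2.2⟩, fun f hf => ?_⟩
              rw [(ih (some f0) c).2 f hf]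
              show _ ↔ (c = f0 ∧ _)
              rw [hpair]
              tauto
            · have he : pvInner ((a, '_') :: rest) (some f0) = none := by
                simp [pvInner, hab, hfa]
              rw [he]
              refine ⟨fun _ hc => ?_, fun f hf => by simp at hf⟩
              exact hfa ((hc.1.symm.trans (hpair.mp hc.2.1)))
        · -- hard mismatch
          have he : pvInner ((a, b) :: rest) forced = none := by
            simp [pvInner, hab, ha, hbu]
          rw [he]
          refine ⟨fun _ hc => ?_, fun f hf => by simp at hf⟩
          have := hc.2.1
          simp [pvRep, ha, hbu] at this
          exact hab this

-- the forced character comes from one of the scanned pairs (or the initial state)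
theorem inner_mem : ∀ (P : List (Char × Char)) (forced f : Option Char),
    pvInner P forced = some f → f = forced ∨ ∃ p ∈ P, f = some p.1 ∨ f = some p.2 := by
  intro P
  induction P with
  | nil =>
    intro forced f hf
    simp only [pvInner, Option.some.injEq] at hf
    exact Or.inl hf.symm
  | cons p rest ih =>
    rintro forced f hf
    obtain ⟨a, b⟩ := p
    by_cases hab : a = b
    · subst hab
      rw [show pvInner ((a, a) :: rest) forced = pvInner rest forced by simp [pvInner]] at hf
      rcases ih forced f hf with h | ⟨q, hq, hv⟩
      · exact Or.inl h
      · exact Or.inr ⟨q, List.mem_cons_of_mem _ hq, hv⟩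
    · by_cases ha : a = '_'
      · subst ha
        cases forced with
        | none =>
          rw [show pvInner (('_', b) :: rest) none = pvInner rest (some b) by
            simp [pvInner, hab]] at hf
          rcases ih (some b) f hf with h | ⟨q, hq, hv⟩
          · exact Or.inr ⟨('_', b), List.mem_cons_self, Or.inr h⟩
          · exact Or.inr ⟨q, List.mem_cons_of_mem _ hq, hv⟩
        | some f0 =>
          by_cases hfb : f0 = b
          · rw [show pvInner (('_', b) :: rest) (some f0) = pvInner rest (some f0) by
              simp [pvInner, hab, hfb]] at hf
            rcases ih (some f0) f hf with h | ⟨q, hq, hv⟩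
            · exact Or.inl h
            · exact Or.inr ⟨q, List.mem_cons_of_mem _ hq, hv⟩
          · rw [show pvInner (('_', b) :: rest) (some f0) = none by
              simp [pvInner, hab, hfb]] at hf
            simp at hf
      · by_cases hbu : b = '_'
        · subst hbu
          cases forced with
          | none =>
            rw [show pvInner ((a, '_') :: rest) none = pvInner rest (some a) by
              simp [pvInner, hab]] at hf
            rcases ih (some a) f hf with h | ⟨q, hq, hv⟩
            · exact Or.inr ⟨(a, '_'), List.mem_cons_self, Or.inl h⟩
            · exact Or.inr ⟨q, List.mem_cons_of_mem _ hq, hv⟩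
          | some f0 =>
            by_cases hfa : f0 = a
            · rw [show pvInner ((a, '_') :: rest) (some f0) = pvInner rest (some f0) by
                simp [pvInner, hab, hfa]] at hf
              rcases ih (some f0) f hf with h | ⟨q, hq, hv⟩
              · exact Or.inl h
              · exact Or.inr ⟨q, List.mem_cons_of_mem _ hq, hv⟩
            · rw [show pvInner ((a, '_') :: rest) (some f0) = none by
                simp [pvInner, hab, hfa]] at hf
              simp at hf
        · rw [show pvInner ((a, b) :: rest) forced = none by
            simp [pvInner, hab, ha, hbu]] at hf
          simp at hf

-- the pair condition on s and its j-shift is the overlap condition on the replaced string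
theorem valid_iff_qB (L : List Char) (c : Char) (jn : Nat) (hj1 : 1 ≤ jn) (hj2 : jn ≤ L.length) :
    ValidP c (L.zip (L.drop jn)) ↔ qBfun (tOf L c) ((jn : Int)) = true := by
  have ht : tOf L c = L.map (pvRep c) := by
    rw [tOf, replace_single]; rfl
  have htlen : (tOf L c).length = L.length := by rw [ht, List.length_map]
  simp only [qBfun, decide_eq_true_eq, PySem.List.slice_from_natCast]
  rw [show ((tOf L c).length : Int) - (jn : Int) = ((L.length - jn : Nat) : Int) by
    rw [htlen]; omega, PySem.List.slice_to_natCast, ht, ← List.map_drop, ← List.map_take]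
  have hlen_zip : (L.zip (L.drop jn)).length = L.length - jn := by simp
  constructor
  · intro hv
    apply List.ext_getElem (by simp)
    intro i h1 h2
    have hi : i < L.length - jn := by simpa using h1
    simp only [List.getElem_map, List.getElem_drop, List.getElem_take]
    have := hv ((L.zip (L.drop jn))[i]'(by omega)) (List.getElem_mem _)
    rw [List.getElem_zip] at this
    simp only [List.getElem_drop] at this
    exact this.symm
  · intro he p hp
    obtain ⟨i, hi, hpe⟩ := List.mem_iff_getElem.mp hp
    have hi' : i < L.length - jn := by rw [hlen_zip] at hi; exact hi
    rw [List.getElem_zip] at hpe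
    have h3 := congrArg (fun l => l[i]?) he
    simp only [List.getElem?_map, List.getElem?_drop, List.getElem?_take_of_lt hi'] at h3
    rw [List.getElem?_eq_getElem (by omega : jn + i < L.length),
      List.getElem?_eq_getElem (by omega : i < L.length)] at h3
    simp only [Option.map_some, Option.some.injEq] at h3
    subst hpe
    simp only [List.getElem_drop]
    exact h3.symm

-- first-success property of findSome? over a strictly increasing list
theorem findSome?_first {α : Type} (R : List Int) (g : Int → Option α) (hpw : R.Pairwise (· < ·)) :
    (R.findSome? g = none → ∀ j ∈ R, g j = none) ∧
    (∀ x, R.findSome? g = some x → ∃ j ∈ R, g j = some x ∧ ∀ j' ∈ R, g j' ≠ none → j ≤ j') := by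
  induction R with
  | nil => exact ⟨fun _ j hj => absurd hj (List.not_mem_nil), fun x hx => by simp at hx⟩
  | cons a R' ih =>
    have hpw' := (List.pairwise_cons.mp hpw).2
    have hlt := (List.pairwise_cons.mp hpw).1
    obtain ⟨ihn, ihs⟩ := ih hpw'
    cases hga : g a with
    | some y =>
      refine ⟨fun h => by simp [List.findSome?_cons, hga] at h, fun x hx => ?_⟩
      rw [List.findSome?_cons, hga] at hx
      refine ⟨a, List.mem_cons_self, by rw [hga]; exact hx, fun j' hj' _ => ?_⟩
      rcases List.mem_cons.mp hj' with h | h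
      · omega
      · exact le_of_lt (hlt j' h)
    | none =>
      rw [List.findSome?_cons, hga]
      refine ⟨fun h j hj => ?_, fun x hx => ?_⟩
      · rcases List.mem_cons.mp hj with h' | h'
        · rw [h']; exact hga
        · exact ihn h j h'
      · obtain ⟨j, hj, hgj, hmin⟩ := ihs x hx
        refine ⟨j, List.mem_cons_of_mem _ hj, hgj, fun j' hj' hne => ?_⟩
        rcases List.mem_cons.mp hj' with h' | h'
        · exact absurd (h' ▸ hga) hne
        · exact hmin j' h' hne

-- B's port with its lets unfolded (identical up to zeta/beta reduction)
theorem portB_eq (s : String) :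
    complete_pattern_alt s =
      (match (PySem.List.pyRange 1 ((s.toList.length : Int) + 1) 1).findSome? (fun j =>
          match pvInner (s.toList.zip (PySem.List.slice s.toList (some j) none)) none with
          | some forced => some (forced.getD ((PySem.List.pyGet?
              (PySem.List.sorted (PySem.Set.ofList s.toList) (fun x => x) false) 0).getD '_'))
          | none => none) with
        | some c => String.mk [c]
        | none => "") := rfl

-- the main equivalence on nonempty strings
theorem main_eq (s : String) (hpre : s ≠ "") : complete_pattern s = complete_pattern_alt s := by
  have hL : s.toList ≠ [] := fun h => hpre (by
    have := congrArg String.ofList h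
    simpa using this)
  set L := s.toList with hLdef
  have hn : 0 < L.length := List.length_pos_iff.mpr hL
  set chars := PySem.List.sorted (PySem.Set.ofList L) (fun x => x) false with hchars
  have hperm : chars.Perm (PySem.Set.ofList L) := PySem.List.sorted_perm _ _ _
  have hpw : chars.Pairwise (· < ·) := PySem.List.sorted_ofList_pairwise_lt L
  obtain ⟨c0, rest, hcs⟩ := List.exists_cons_of_ne_nil
    (show chars ≠ [] by
      rw [hchars, Ne, PySem.List.sorted_eq_nil_iff]
      intro h
      obtain ⟨x, xs, hx⟩ := List.exists_cons_of_ne_nil hL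
      have : x ∈ PySem.Set.ofList L := by
        rw [PySem.Set.mem_ofList, hx]; exact List.mem_cons_self
      rw [h] at this
      exact absurd this (List.not_mem_nil))
  have hc0S : c0 ∈ PySem.Set.ofList L := hperm.mem_iff.mp (hcs ▸ List.mem_cons_self)
  have hc0min : ∀ c ∈ PySem.Set.ofList L, c0 ≤ c := by
    intro c hc
    have hcc : c ∈ chars := hperm.mem_iff.mpr hc
    rw [hcs] at hcc
    rcases List.mem_cons.mp hcc with h | h
    · exact le_of_eq h.symm
    · exact le_of_lt ((List.pairwise_cons.mp (hcs ▸ hpw)).1 c h)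
  have hc0' : (PySem.List.pyGet? chars 0).getD '_' = c0 := by
    rw [hcs]
    simp [PySem.List.pyGet?, PySem.List.pyIdx?]
  -- feasibility of a period j for a fill character c
  have hvalid : ∀ (jn : Nat) (c : Char), 1 ≤ jn → jn ≤ L.length →
      (ValidP c (L.zip (PySem.List.slice L (some (jn : Int)) none)) ↔
        qBfun (tOf L c) ((jn : Int)) = true) := by
    intro jn c h1 h2
    rw [PySem.List.slice_from_natCast]
    exact valid_iff_qB L c jn h1 h2
  -- the A side: min over the flatMap of all valid (period, char) pairs
  rw [complete_pattern]
  simp only []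
  rw [portA_repeats L]
  have hpairn : ((L.length : Int), c0) ∈ (PySem.Set.ofList L).flatMap (pairsOf L) := by
    rw [mem_flatMap_pairs]
    refine ⟨hc0S, List.mem_filter.mpr ⟨?_, ?_⟩⟩
    · rw [show ((tOf L c0).length : Int) = (L.length : Int) by
        unfold tOf; rw [len_replace_single], PySem.List.mem_pyRange_one]
      omega
    · rw [show ((L.length : Int)) = ((tOf L c0).length : Int) by
        unfold tOf; rw [len_replace_single]]
      exact qB_full (tOf L c0)
  obtain ⟨rA, hminA, hmemA, hallA⟩ := min2?_int_char _ (List.ne_nil_of_mem hpairn)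
  rw [hminA]
  -- the B side: first feasible period via findSome?
  rw [portB_eq s]
  set g : Int → Option Char := fun j =>
      match pvInner (L.zip (PySem.List.slice L (some j) none)) none with
      | some forced => some (forced.getD ((PySem.List.pyGet? chars 0).getD '_'))
      | none => none with hg
  obtain ⟨hfn, hfs⟩ := findSome?_first (PySem.List.pyRange 1 ((L.length : Int) + 1) 1) g
    (PySem.List.pairwise_lt_pyRange_one 1 ((L.length : Int) + 1))
  have hgfull : g ((L.length : Int)) ≠ none := by
    rw [hg]
    simp only [PySem.List.slice_from_natCast, List.drop_length, List.zip_nil_right]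
    simp [pvInner]
  cases hfind : (PySem.List.pyRange 1 ((L.length : Int) + 1) 1).findSome? g with
  | none =>
    exact absurd (hfn hfind ((L.length : Int))
      (PySem.List.mem_pyRange_one.mpr (by omega))) hgfull
  | some x =>
    obtain ⟨j0, hj0mem, hgj0, hj0min⟩ := hfs x hfind
    have hj0b := PySem.List.mem_pyRange_one.mp hj0mem
    obtain ⟨jn0, rfl⟩ : ∃ jn : Nat, j0 = (jn : Int) :=
      ⟨j0.toNat, (Int.toNat_of_nonneg (by omega)).symm⟩
    have hjn0a : 1 ≤ jn0 := by exact_mod_cast hj0b.1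
    have hjn0b : jn0 ≤ L.length := by
      have := hj0b.2; omega
    rw [hg] at hgj0
    simp only [] at hgj0
    cases hinner : pvInner (L.zip (PySem.List.slice L (some ((jn0 : Nat) : Int)) none)) none with
    | none => rw [hinner] at hgj0; simp at hgj0
    | some f =>
      rw [hinner] at hgj0
      simp only [Option.some.injEq] at hgj0
      obtain ⟨hsp⟩ : Nonempty (∀ c, (OkF c f ↔ (OkF c none ∧
          ValidP c (L.zip (PySem.List.slice L (some ((jn0 : Nat) : Int)) none))))) :=
        ⟨fun c => (inner_spec _ none c).2 f hinner⟩
      -- x is a valid fill character for period jn0, and it lies in set(s)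
      have hxS : x ∈ PySem.Set.ofList L ∧ qBfun (tOf L x) ((jn0 : Int)) = true := by
        cases hf : f with
        | none =>
          have hx : x = c0 := by rw [← hgj0, hf, Option.getD_none, hc0']
          subst hx
          refine ⟨hc0S, (hvalid jn0 x hjn0a hjn0b).mp ?_⟩
          have := (hsp x).mp (by rw [hf]; trivial)
          exact this.2
        | some d =>
          have hx : x = d := by rw [← hgj0, hf, Option.getD_some]
          subst hx
          have hval : ValidP x (L.zip (PySem.List.slice L (some ((jn0 : Nat) : Int)) none)) := by
            have := (hsp x).mp (by rw [hf]; show x = x; rfl)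
            exact this.2
          refine ⟨?_, (hvalid jn0 x hjn0a hjn0b).mp hval⟩
          rw [PySem.Set.mem_ofList]
          rcases inner_mem _ none f hinner with h | ⟨p, hp, hv⟩
          · rw [hf] at h; simp at h
          · rw [PySem.List.slice_from_natCast] at hp
            rcases hv with hv | hv
            · rw [hf] at hv; simp only [Option.some.injEq] at hv
              rw [hv]; exact (List.of_mem_zip hp).1
            · rw [hf] at hv; simp only [Option.some.injEq] at hv
              rw [hv]; exact List.mem_of_mem_drop (List.of_mem_zip hp).2
      -- (jn0, x) is one of A's pairs
      have hmemx : (((jn0 : Nat) : Int), x) ∈ (PySem.Set.ofList L).flatMap (pairsOf L) := by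
        rw [mem_flatMap_pairs]
        refine ⟨hxS.1, List.mem_filter.mpr ⟨?_, hxS.2⟩⟩
        rw [show ((tOf L x).length : Int) = (L.length : Int) by
          unfold tOf; rw [len_replace_single], PySem.List.mem_pyRange_one]
        omega
      -- (jn0, x) is lexicographically least among A's pairs
      have hleast : ∀ q ∈ (PySem.Set.ofList L).flatMap (pairsOf L),
          lexLe (((jn0 : Nat) : Int), x) q := by
        rintro ⟨j, c⟩ hq
        obtain ⟨hcS, hjF⟩ := (mem_flatMap_pairs L (j, c)).mp hq
        obtain ⟨hjr, hjq⟩ := List.mem_filter.mp hjF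
        rw [show ((tOf L c).length : Int) = (L.length : Int) by
          unfold tOf; rw [len_replace_single], PySem.List.mem_pyRange_one] at hjr
        obtain ⟨jn, rfl⟩ : ∃ jn : Nat, j = (jn : Int) :=
          ⟨j.toNat, (Int.toNat_of_nonneg (by omega)).symm⟩
        have hjra : (1:Int) ≤ (jn : Int) := hjr.1
        have hjrb : (jn : Int) < (L.length : Int) + 1 := hjr.2
        have hjna : 1 ≤ jn := by exact_mod_cast hjra
        have hjnb : jn ≤ L.length := by omega
        have hvc : ValidP c (L.zip (PySem.List.slice L (some ((jn : Nat) : Int)) none)) :=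
          (hvalid jn c hjna hjnb).mpr hjq
        have hgj : g ((jn : Nat) : Int) ≠ none := by
          rw [hg]
          simp only []
          cases hinn : pvInner (L.zip (PySem.List.slice L (some ((jn : Nat) : Int)) none)) none with
          | none => exact absurd ⟨trivial, hvc⟩ ((inner_spec _ none c).1 hinn)
          | some f' => simp
        have hle : ((jn0 : Nat) : Int) ≤ ((jn : Nat) : Int) :=
          hj0min _ (PySem.List.mem_pyRange_one.mpr (by constructor <;> omega)) hgj
        rcases lt_or_eq_of_le hle with h | h
        · exact Or.inl h
        · refine Or.inr ⟨h, ?_⟩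
          have hjeq : jn = jn0 := by exact_mod_cast h.symm
          subst hjeq
          have hok : OkF c f := (hsp c).mpr ⟨trivial, hvc⟩
          cases hf : f with
          | none =>
            have hx : x = c0 := by rw [← hgj0, hf, Option.getD_none, hc0']
            rw [hx]
            exact hc0min c hcS
          | some d =>
            have hx : x = d := by rw [← hgj0, hf, Option.getD_some]
            rw [hf] at hok
            exact le_of_eq (hx.trans hok.symm)
      have hrAeq : rA = (((jn0 : Nat) : Int), x) :=
        lexLe_antisymm (hallA _ hmemx) (hleast rA hmemA)
      rw [hrAeq]

-- ===== VERDICT (by name: the statement is the Claim_ definition above) =====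
theorem complete_pattern_spec : Claim_equal_complete_pattern := by
  intro s _hdom hpre
  show complete_pattern s = complete_pattern_alt s
  exact main_eq s hpre
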